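-- pv_equiv track=rewrite | github.com/amnnsharma/probe_test | streamlit_app.py | duplicate_remove
-- ===== SOURCE A (Python) =====
-- def duplicate_remove(list1,list2):
--
--     i=0
--     while len(list1)>1:
--         if list1[i+1]==list1[i]:
--             list1.pop(i)
--             list2.pop(i)
--         else:
--             break
--
--     j=-1
--     while len(list1)>1:
--         if list1[j]==list1[j-1]:
--             list1.pop(j)
--             list2.pop(j)
--         else:
--             break
--
--     return list1, list2
-- ===== SOURCE B (Python) =====
-- def _run(l):
--     # length of the initial equal-run of l (0 for an empty list): one left-to-right scan
--     k = 1
--     while k < len(l) and l[k] == l[k - 1]: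
--         k += 1
--     return k if l else 0
--
--
-- def duplicate_remove(list1, list2):
--     # Return-value re-implementation: count the leading and trailing equal-run
--     # lengths of list1 once and slice both lists once (A mutates its arguments
--     # in place; B leaves them untouched and returns fresh lists).
--     a = max(_run(list1) - 1, 0)
--     tail = list1[a:]
--     b = max(_run(tail[::-1]) - 1, 0)
--     return tail[:len(tail) - b], list2[a:len(list2) - b]
-- ===== Notes on version B (the rewrite author's own statement) =====
-- stated objective: alternative
-- what changed: Instead of A's two mutate-in-place while-loops that repeatedly pop index 0 (shifting the rest of the list each time) and then pop from the end, B counts the leading and trailing equal-run lengths of list1 and slices both lists once; B does not mutate its arguments (equivalence is about the return value).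
import Mathlib
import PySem

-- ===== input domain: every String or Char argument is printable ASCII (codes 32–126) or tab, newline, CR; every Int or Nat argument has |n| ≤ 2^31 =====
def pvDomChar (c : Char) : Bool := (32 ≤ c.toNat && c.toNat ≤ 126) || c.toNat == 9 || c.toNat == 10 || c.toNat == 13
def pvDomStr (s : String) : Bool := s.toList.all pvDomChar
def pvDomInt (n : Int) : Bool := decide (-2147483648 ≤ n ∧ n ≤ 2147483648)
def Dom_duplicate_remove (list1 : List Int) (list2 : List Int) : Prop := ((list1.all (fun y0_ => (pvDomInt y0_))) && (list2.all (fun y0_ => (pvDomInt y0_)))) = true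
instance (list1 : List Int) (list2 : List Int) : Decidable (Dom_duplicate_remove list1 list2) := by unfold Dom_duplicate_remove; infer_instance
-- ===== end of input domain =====

-- B collapses the leading/trailing equal-runs of list1 by counting run lengths and slicing
-- both lists once, instead of A's repeated pop(0)/pop(-1) loops; A mutates its arguments in
-- place, B does not — the equivalence proved here is about the RETURN value only.

-- ===== PORT A =====
-- first while loop: while len(list1)>1: if list1[1]==list1[0]: list1.pop(0); list2.pop(0) else break
-- (list2.pop(0) raises IndexError on an empty list2 → none)
def pvALoop1 : List Int → List Int → Option (List Int × List Int)
  | x :: y :: rest, l2 =>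
    if y = x then
      match PySem.List.pop? l2 0 with
      | some (_, l2') => pvALoop1 (y :: rest) l2'
      | none => none
    else some (x :: y :: rest, l2)
  | l1, l2 => some (l1, l2)

-- second while loop: while len(list1)>1: if list1[-1]==list1[-2]: list1.pop(-1); list2.pop(-1) else break
-- (list1.pop(-1) with len(list1)>1 is exactly dropLast; list2.pop(-1) raises on empty list2 → none)
def pvALoop2 (l1 l2 : List Int) : Option (List Int × List Int) :=
  if 1 < l1.length then
    if PySem.List.pyGet? l1 (-1) = PySem.List.pyGet? l1 (-2) then
      match PySem.List.pop? l2 (-1) with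
      | some (_, l2') => pvALoop2 l1.dropLast l2'
      | none => none
    else some (l1, l2)
  else some (l1, l2)
termination_by l1.length
decreasing_by simp [List.length_dropLast]; omega

def duplicate_remove (list1 : List Int) (list2 : List Int) : List Int × List Int :=
  (((pvALoop1 list1 list2).bind fun p => pvALoop2 p.1 p.2)).getD ([], [])

-- ===== PORT B =====
-- _run(l): length of the initial equal-run (adjacent comparisons), 0 for []
def pvRunLen : List Int → Nat
  | [] => 0
  | [_] => 1
  | x :: y :: r => if y = x then pvRunLen (y :: r) + 1 else 1

def duplicate_remove_alt (list1 : List Int) (list2 : List Int) : List Int × List Int :=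
  let a := pvRunLen list1 - 1
  let tail := list1.drop a
  let b := pvRunLen tail.reverse - 1
  -- tail[:len(tail)-b], list2[a:len(list2)-b] — nonnegative clamped slices, exact here
  (tail.take (tail.length - b), (list2.drop a).take (list2.length - a - b))

-- ===== PRECONDITION & SPEC =====
-- pvLeadCount l: how many elements at the front of l equal its first element (a shape measure)
def pvLeadCount (l : List Int) : Nat :=
  match l with
  | [] => 0
  | x :: _ => (l.takeWhile (fun v => v == x)).length

-- Pre_ excludes exactly the inputs on which A raises IndexError (pop from an exhausted list2):
-- list2 must have at least as many elements as the number of pops A performs on list1,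
-- i.e. (leading equal-run length - 1) + (trailing equal-run length of the rest - 1).
def Pre_duplicate_remove (list1 : List Int) (list2 : List Int) : Prop :=
  (pvLeadCount list1 - 1) + (pvLeadCount (list1.drop (pvLeadCount list1 - 1)).reverse - 1) ≤ list2.length
instance (list1 : List Int) (list2 : List Int) : Decidable (Pre_duplicate_remove list1 list2) := by
  unfold Pre_duplicate_remove; infer_instance
def pvWitness_duplicate_remove : List Int × List Int := ([1, 1, 2, 3, 3], [10, 20, 30, 40, 50])

def Spec_duplicate_remove (list1 : List Int) (list2 : List Int) (out : List Int × List Int) : Prop := out = duplicate_remove_alt list1 list2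
instance (list1 : List Int) (list2 : List Int) (out : List Int × List Int) : Decidable (Spec_duplicate_remove list1 list2 out) := by unfold Spec_duplicate_remove; infer_instance

-- ===== CLAIM (what is proved, stated in full; the proofs are below) =====
def Claim_equal_duplicate_remove : Prop := ∀ (list1 : List Int) (list2 : List Int), Dom_duplicate_remove list1 list2 → Pre_duplicate_remove list1 list2 → Spec_duplicate_remove list1 list2 (duplicate_remove list1 list2)


-- ===== LEMMAS AND PROOFS =====

theorem pvRunLen_pos (y : Int) (r : List Int) : 1 ≤ pvRunLen (y :: r) := by
  cases r
  · simp [pvRunLen]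
  · simp only [pvRunLen]; split <;> omega

theorem pvRunLen_eq_leadCount : ∀ (l : List Int), pvRunLen l = pvLeadCount l
  | [] => rfl
  | [x] => by simp [pvRunLen, pvLeadCount]
  | x :: y :: r => by
    by_cases h : y = x
    · subst h
      have ih := pvRunLen_eq_leadCount (y :: r)
      simp [pvRunLen, pvLeadCount] at ih ⊢
      omega
    · simp [pvRunLen, pvLeadCount, h]

theorem drop_pred_cons {α : Type} (x : α) (t : List α) (k : Nat) (hk : 1 ≤ k) :
    List.drop k (x :: t) = List.drop (k - 1) t := by
  obtain ⟨k', rfl⟩ : ∃ k', k = k' + 1 := ⟨k - 1, by omega⟩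
  simp

theorem pvALoop1_eq : ∀ (l1 l2 : List Int), pvRunLen l1 - 1 ≤ l2.length →
    pvALoop1 l1 l2 = some (l1.drop (pvRunLen l1 - 1), l2.drop (pvRunLen l1 - 1))
  | [], l2, _ => by simp [pvALoop1, pvRunLen]
  | [x], l2, _ => by simp [pvALoop1, pvRunLen]
  | x :: y :: r, l2, h => by
    by_cases hxy : y = x
    · subst hxy
      have hpos := pvRunLen_pos y r
      have hlen : pvRunLen (y :: y :: r) = pvRunLen (y :: r) + 1 := by simp [pvRunLen]
      rw [hlen] at h
      obtain ⟨z, l2', rfl⟩ : ∃ z l2', l2 = z :: l2' := by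
        cases l2 with
        | nil => simp at h; omega
        | cons z t => exact ⟨z, t, rfl⟩
      simp only [List.length_cons] at h
      have ih := pvALoop1_eq (y :: r) l2' (by omega)
      rw [show pvALoop1 (y :: y :: r) (z :: l2') = pvALoop1 (y :: r) l2' from by
            simp [pvALoop1, PySem.List.pop?_zero_cons]]
      rw [ih, hlen]
      simp only [Nat.add_sub_cancel]
      rw [drop_pred_cons y (y :: r) _ hpos, drop_pred_cons z l2' _ hpos]
    · simp [pvALoop1, hxy, pvRunLen]

theorem pvALoop2_eq : ∀ (m l2 : List Int), pvRunLen m - 1 ≤ l2.length →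
    pvALoop2 m.reverse l2 =
      some ((m.drop (pvRunLen m - 1)).reverse, l2.take (l2.length - (pvRunLen m - 1)))
  | [], l2, _ => by simp [pvALoop2, pvRunLen]
  | [x], l2, _ => by simp [pvALoop2, pvRunLen]
  | x :: y :: r, l2, h => by
    have hget1 : PySem.List.pyGet? (x :: y :: r).reverse (-1) = some x := by
      rw [List.reverse_cons]; exact PySem.List.pyGet?_neg_one_append_singleton _ x
    have hget2 : PySem.List.pyGet? (x :: y :: r).reverse (-2) = some y := by
      rw [PySem.List.pyGet?_neg_ofNat _ 2 (by omega) (by simp)]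
      simp
    have hlen1 : 1 < (x :: y :: r).reverse.length := by simp
    by_cases hxy : y = x
    · subst hxy
      have hpos := pvRunLen_pos y r
      have hlen : pvRunLen (y :: y :: r) = pvRunLen (y :: r) + 1 := by simp [pvRunLen]
      rw [hlen] at h
      simp only [Nat.add_sub_cancel] at h
      rcases List.eq_nil_or_concat l2 with rfl | ⟨w, z, rfl⟩
      · simp at h; omega
      simp only [List.concat_eq_append] at h ⊢
      have hw : pvRunLen (y :: r) - 1 ≤ w.length := by
        simp [List.length_append] at h; omega
      have ih := pvALoop2_eq (y :: r) w hw
      rw [pvALoop2]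
      rw [if_pos hlen1, hget1, hget2, if_pos rfl, PySem.List.pop?_last w z]
      simp only [List.reverse_cons, List.dropLast_concat]
      simp only [List.reverse_cons] at ih
      rw [ih, hlen]
      simp only [Nat.add_sub_cancel]
      rw [drop_pred_cons y (y :: r) _ hpos]
      rw [List.take_append_of_le_length (by simp; omega)]
      have : w.length + 1 - pvRunLen (y :: r) = w.length - (pvRunLen (y :: r) - 1) := by omega
      simp [this]
    · have hlen : pvRunLen (x :: y :: r) = 1 := by simp [pvRunLen, hxy]
      rw [pvALoop2]
      rw [if_pos hlen1, hget1, hget2]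
      rw [if_neg (by simpa using fun hxx => hxy hxx.symm)]
      simp [hlen]

-- ===== VERDICT (by name: the statement is the Claim_ definition above) =====
theorem duplicate_remove_spec : Claim_equal_duplicate_remove := by
  intro l1 l2 _ hp
  unfold Pre_duplicate_remove at hp
  simp only [← pvRunLen_eq_leadCount] at hp
  unfold Spec_duplicate_remove duplicate_remove duplicate_remove_alt
  rw [pvALoop1_eq l1 l2 (by omega)]
  have h2 := pvALoop2_eq (l1.drop (pvRunLen l1 - 1)).reverse (l2.drop (pvRunLen l1 - 1))
      (by simp only [List.length_drop]; omega)
  rw [List.reverse_reverse] at h2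
  simp only [Option.bind_some, Option.getD_some, h2]
  rw [List.reverse_drop]
  simp [List.length_drop]
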